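-- pv_equiv track=rewrite | github.com/rsbohn/waffle8 | tools/magtape_tool.py | decode_header_words
-- ===== SOURCE A (Python) =====
-- from typing import Iterable, List, Sequence
--
-- SIXBIT_MASK = 0x3F
--
-- def sixbit_to_char(value: int) -> str:
--     lookup = {
--         0: " ",
--         30: "\r",
--         31: "\n",
--         42: "!",
--         43: ",",
--         44: "-",
--         45: ".",
--         46: "'",
--         47: ":",
--         48: ";",
--         49: "?",
--     }
--     if 1 <= value <= 26:
--         return chr(value + 64)
--     if 32 <= value <= 41:
--         return chr(value - 32 + ord("0"))
--     return lookup.get(value, "?")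
--
-- def decode_sixbit_word(word: int) -> tuple[str, str]:
--     high = (word >> 6) & SIXBIT_MASK
--     low = word & SIXBIT_MASK
--     return sixbit_to_char(high), sixbit_to_char(low)
--
-- def decode_header_words(words: Sequence[int]) -> tuple[str, str]:
--     if len(words) < 6:
--         raise ValueError("Header requires at least six words")
--     label_chars: List[str] = []
--     format_chars: List[str] = []
--     for idx in range(3):
--         label_chars.extend(decode_sixbit_word(words[idx]))
--     for idx in range(3, 6):
--         format_chars.extend(decode_sixbit_word(words[idx]))
--     return "".join(label_chars).rstrip(), "".join(format_chars).rstrip()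
-- ===== SOURCE B (Python) =====
-- from typing import Sequence
--
-- _TABLE = " ABCDEFGHIJKLMNOPQRSTUVWXYZ???\r\n0123456789!,-.':;?" + "?" * 14
--
-- def _decode3(ws):
--     # pack the three words' low 12 bits into one 36-bit integer, then peel
--     # off six base-64 digits from the bottom, building the string back-to-front
--     n = 0
--     for w in ws:
--         n = n * 4096 + (w % 4096)
--     s = ""
--     for _ in range(6):
--         s = _TABLE[n % 64] + s
--         n //= 64
--     return s.rstrip()
--
-- def decode_header_words(words: Sequence[int]) -> tuple[str, str]:
--     if len(words) < 6:
--         raise ValueError("Header requires at least six words")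
--     return _decode3(words[0:3]), _decode3(words[3:6])
-- ===== Notes on version B (the rewrite author's own statement) =====
-- stated objective: alternative
-- what changed: Instead of decoding each word into a (high,low) character pair, B packs each group of three words' low 12 bits into one 36-bit integer and peels six base-64 digits off it bottom-up with repeated divmod, building each string back-to-front via a 64-entry table instead of A's range tests and dict.
import Mathlib
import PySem

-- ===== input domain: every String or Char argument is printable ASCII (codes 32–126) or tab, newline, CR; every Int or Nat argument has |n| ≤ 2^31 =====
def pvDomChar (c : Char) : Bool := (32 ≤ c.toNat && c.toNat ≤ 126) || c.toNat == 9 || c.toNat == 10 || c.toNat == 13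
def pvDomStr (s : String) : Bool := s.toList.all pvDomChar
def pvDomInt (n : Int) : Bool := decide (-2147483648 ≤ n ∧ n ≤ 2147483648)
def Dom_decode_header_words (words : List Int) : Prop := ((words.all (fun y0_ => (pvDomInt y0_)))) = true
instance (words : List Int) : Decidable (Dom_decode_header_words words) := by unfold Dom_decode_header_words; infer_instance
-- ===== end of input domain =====

-- B packs each 3-word group's low 12 bits into one 36-bit integer and peels six
-- base-64 digits off it back-to-front via a 64-entry table, instead of A's per-word
-- high/low split with range tests and a dict (objective: alternative).


-- ===== PORT A =====
def sixbit_to_char (value : Int) : String :=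
  let lookup : PySem.Dict Int String := PySem.Dict.ofList
    [(0, " "), (30, "\r"), (31, "\n"), (42, "!"), (43, ","), (44, "-"),
     (45, "."), (46, "'"), (47, ":"), (48, ";"), (49, "?")]
  if 1 ≤ value ∧ value ≤ 26 then String.ofList [Char.ofNat (value + 64).toNat]
  else if 32 ≤ value ∧ value ≤ 41 then String.ofList [Char.ofNat (value - 32 + 48).toNat]
  else (PySem.Dict.get? lookup value).getD "?"

-- (word >> 6) & 0x3F and word & 0x3F: Python's shift/mask on any int = floordiv/mod by 64
def decode_sixbit_word (word : Int) : String × String :=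
  let high := PySem.Int.mod (PySem.Int.floordiv word 64) 64
  let low := PySem.Int.mod word 64
  (sixbit_to_char high, sixbit_to_char low)

def decode_header_words (words : List Int) : String × String :=
  -- len(words) < 6 raises ValueError: excluded by Pre_; pyGetD's default is unreachable under Pre_
  let label_chars := (PySem.List.pyRange 0 3 1).foldl
    (fun acc idx => let p := decode_sixbit_word (PySem.List.pyGetD words idx 0); acc ++ [p.1, p.2]) []
  let format_chars := (PySem.List.pyRange 3 6 1).foldl
    (fun acc idx => let p := decode_sixbit_word (PySem.List.pyGetD words idx 0); acc ++ [p.1, p.2]) []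
  (PySem.Str.rstrip (PySem.Str.join "" label_chars), PySem.Str.rstrip (PySem.Str.join "" format_chars))

-- ===== PORT B =====
def pvTable : List Char :=
  (" ABCDEFGHIJKLMNOPQRSTUVWXYZ???\r\n0123456789!,-.':;?").toList ++ List.replicate 14 '?'

-- _decode3: fold the three words into one 36-bit integer, then peel six base-64
-- digits off the bottom, prepending a table character each time (string prepend
-- ported as List.cons on the char list); n % 64 is always in 0..63 so _TABLE[...]
-- never raises and getD's default is unreachable
def pvDecode3 (ws : List Int) : String :=
  let n := ws.foldl (fun n w => n * 4096 + PySem.Int.mod w 4096) 0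
  let r := (PySem.List.pyRange 0 6 1).foldl
    (fun (p : Int × List Char) _ =>
      (PySem.Int.floordiv p.1 64, pvTable.getD (PySem.Int.mod p.1 64).toNat '?' :: p.2))
    (n, [])
  PySem.Str.rstrip (String.ofList r.2)

def decode_header_words_alt (words : List Int) : String × String :=
  (pvDecode3 (PySem.List.slice words (some 0) (some 3)), pvDecode3 (PySem.List.slice words (some 3) (some 6)))

-- ===== PRECONDITION & SPEC =====
-- Pre_ excludes lists with fewer than six words, on which A raises ValueError (and B does too).
def Pre_decode_header_words (words : List Int) : Prop := 6 ≤ words.length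
instance (words : List Int) : Decidable (Pre_decode_header_words words) := by
  unfold Pre_decode_header_words; infer_instance
def pvWitness_decode_header_words : List Int := [260, 772, 1286, 2081, 2603, 0]

def Spec_decode_header_words (words : List Int) (out : String × String) : Prop := out = decode_header_words_alt words
instance (words : List Int) (out : String × String) : Decidable (Spec_decode_header_words words out) := by unfold Spec_decode_header_words; infer_instance

-- ===== CLAIM (what is proved, stated in full; the proofs are below) =====
def Claim_equal_decode_header_words : Prop := ∀ (words : List Int), Dom_decode_header_words words → Pre_decode_header_words words → Spec_decode_header_words words (decode_header_words words)

-- ===== LEMMAS AND PROOFS =====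
theorem table_char (n : Nat) (hn : n < 64) :
    sixbit_to_char (n : Int) = String.ofList [pvTable.getD n '?'] := by
  have h : ∀ m ∈ Finset.range 64, sixbit_to_char (m : Int) = String.ofList [pvTable.getD m '?'] := by decide
  exact h n (Finset.mem_range.mpr hn)

theorem mod64_bounds (w : Int) : 0 ≤ PySem.Int.mod w 64 ∧ PySem.Int.mod w 64 < 64 := by
  rw [PySem.Int.mod_eq_emod_of_pos (by norm_num)]
  exact ⟨Int.emod_nonneg _ (by norm_num), Int.emod_lt_of_pos _ (by norm_num)⟩

theorem table_char' (v : Int) (h0 : 0 ≤ v) (h64 : v < 64) :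
    sixbit_to_char v = String.ofList [pvTable.getD v.toNat '?'] := by
  obtain ⟨n, rfl⟩ : ∃ n : Nat, v = (n : Int) := ⟨v.toNat, (Int.toNat_of_nonneg h0).symm⟩
  simpa using table_char n (by omega)

theorem decode_word_eq (w : Int) :
    decode_sixbit_word w =
      (String.ofList [pvTable.getD (PySem.Int.mod (PySem.Int.floordiv w 64) 64).toNat '?'],
       String.ofList [pvTable.getD (PySem.Int.mod w 64).toNat '?']) := by
  simp only [decode_sixbit_word]
  rw [table_char' _ (mod64_bounds _).1 (mod64_bounds _).2,
      table_char' _ (mod64_bounds _).1 (mod64_bounds _).2]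

-- the six base-64 digits of (A*4096+B)*4096+C are exactly the high/low sixbit fields
theorem decode3_eq (a b c : Int) :
    pvDecode3 [a, b, c] =
      PySem.Str.rstrip (String.ofList
        [pvTable.getD (PySem.Int.mod (PySem.Int.floordiv a 64) 64).toNat '?',
         pvTable.getD (PySem.Int.mod a 64).toNat '?',
         pvTable.getD (PySem.Int.mod (PySem.Int.floordiv b 64) 64).toNat '?',
         pvTable.getD (PySem.Int.mod b 64).toNat '?',
         pvTable.getD (PySem.Int.mod (PySem.Int.floordiv c 64) 64).toNat '?',
         pvTable.getD (PySem.Int.mod c 64).toNat '?']) := by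
  simp only [pvDecode3, show PySem.List.pyRange 0 6 1 = [0,1,2,3,4,5] from by decide,
             List.foldl,
             PySem.Int.mod_eq_emod_of_pos (show (0:Int) < 64 by norm_num),
             PySem.Int.mod_eq_emod_of_pos (show (0:Int) < 4096 by norm_num),
             PySem.Int.floordiv_eq_ediv_of_pos (show (0:Int) < 64 by norm_num)]
  congr 2
  simp only [List.cons.injEq, and_true]
  and_intros <;> (congr 1; omega)

-- ===== VERDICT (by name: the statement is the Claim_ definition above) =====
theorem decode_header_words_spec : Claim_equal_decode_header_words := by
  intro words _ hpre
  unfold Pre_decode_header_words at hpre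
  obtain ⟨w0, w1, w2, w3, w4, w5, rest, rfl⟩ :
      ∃ w0 w1 w2 w3 w4 w5 rest, words = w0 :: w1 :: w2 :: w3 :: w4 :: w5 :: rest := by
    match words, hpre with
    | w0 :: w1 :: w2 :: w3 :: w4 :: w5 :: rest, _ => exact ⟨w0, w1, w2, w3, w4, w5, rest, rfl⟩
  unfold Spec_decode_header_words decode_header_words decode_header_words_alt
  rw [show PySem.List.pyRange 0 3 1 = [0, 1, 2] from by decide,
      show PySem.List.pyRange 3 6 1 = [3, 4, 5] from by decide,
      show PySem.List.slice (w0 :: w1 :: w2 :: w3 :: w4 :: w5 :: rest) (some 0) (some 3) = [w0, w1, w2] from by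
        simp [PySem.List.slice],
      show PySem.List.slice (w0 :: w1 :: w2 :: w3 :: w4 :: w5 :: rest) (some 3) (some 6) = [w3, w4, w5] from by
        simp [PySem.List.slice]]
  simp only [List.foldl]
  rw [show PySem.List.pyGetD (w0 :: w1 :: w2 :: w3 :: w4 :: w5 :: rest) 0 0 = w0 from by simp [PySem.List.pyGetD_zero_cons],
      show PySem.List.pyGetD (w0 :: w1 :: w2 :: w3 :: w4 :: w5 :: rest) 1 0 = w1 from by simp [PySem.List.pyGetD_ofNat'],
      show PySem.List.pyGetD (w0 :: w1 :: w2 :: w3 :: w4 :: w5 :: rest) 2 0 = w2 from by simp [PySem.List.pyGetD_ofNat'],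
      show PySem.List.pyGetD (w0 :: w1 :: w2 :: w3 :: w4 :: w5 :: rest) 3 0 = w3 from by simp [PySem.List.pyGetD_ofNat'],
      show PySem.List.pyGetD (w0 :: w1 :: w2 :: w3 :: w4 :: w5 :: rest) 4 0 = w4 from by simp [PySem.List.pyGetD_ofNat'],
      show PySem.List.pyGetD (w0 :: w1 :: w2 :: w3 :: w4 :: w5 :: rest) 5 0 = w5 from by simp [PySem.List.pyGetD_ofNat']]
  simp [decode_word_eq, decode3_eq, PySem.Str.join, PySem.Chars.join_cons_cons,
        PySem.Chars.join_singleton, String.toList_ofList]
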